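-- pv_equiv track=rewrite | github.com/ThomasParistech/prettydrama | drama.py | split_lines_into_blocks
-- ===== SOURCE A (Python) =====
-- def split_lines_into_blocks(lines: list[str],
--                             keyword: str) -> list[list[str]]:
--     """Split a list of lines into blocks whenever a line contains a given keyword."""
--     blocks: list[list[str]] = []
--     current_block: list[str] = []
--
--     keyword_lower = keyword.lower()
--     for line in lines:
--         if keyword_lower in line.lower():
--             if current_block:
--                 blocks.append(current_block)
--                 current_block = []
--         else:
--             current_block.append(line)
--
--     if current_block:
--         blocks.append(current_block)
--
--     return blocks
-- ===== SOURCE B (Python) =====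
-- def split_lines_into_blocks(lines: list[str],
--                             keyword: str) -> list[list[str]]:
--     """Split a list of lines into blocks whenever a line contains a given keyword."""
--     kl = keyword.lower()
--     sep = [kl in line.lower() for line in lines]
--     blocks: list[list[str]] = []
--     i, n = 0, len(lines)
--     while i < n:
--         if sep[i]:
--             i += 1
--         else:
--             j = i + 1
--             while j < n and not sep[j]:
--                 j += 1
--             blocks.append(lines[i:j])
--             i = j
--     return blocks
-- ===== Notes on version B (the rewrite author's own statement) =====
-- stated objective: alternative
-- what changed: Replaces the accumulator-and-flush loop by a precomputed separator mask and a two-pointer scan that finds each maximal run of non-keyword lines and emits it as a slice.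
import Mathlib
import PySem

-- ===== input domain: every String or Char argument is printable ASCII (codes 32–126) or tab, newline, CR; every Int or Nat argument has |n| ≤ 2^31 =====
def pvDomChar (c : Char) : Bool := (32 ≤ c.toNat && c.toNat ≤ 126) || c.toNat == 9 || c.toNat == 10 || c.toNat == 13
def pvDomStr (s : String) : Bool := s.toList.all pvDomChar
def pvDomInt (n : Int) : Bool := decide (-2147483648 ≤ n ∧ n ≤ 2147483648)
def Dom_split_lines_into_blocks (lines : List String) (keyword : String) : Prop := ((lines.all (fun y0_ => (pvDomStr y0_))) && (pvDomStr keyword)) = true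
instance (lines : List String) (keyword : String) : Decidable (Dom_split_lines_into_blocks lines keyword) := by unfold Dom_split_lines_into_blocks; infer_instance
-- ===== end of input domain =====

-- B replaces A's accumulator-and-flush loop by a precomputed separator mask and a
-- two-pointer index scan emitting each maximal run of non-keyword lines as a slice (alternative decomposition, same cost).


-- ===== PORT A =====
-- literal port of A: fold over the lines with state (blocks, current_block), final flush
def split_lines_into_blocks (lines : List String) (keyword : String) : List (List String) :=
  let keyword_lower := PySem.Str.lower keyword
  let st := lines.foldl
    (fun (st : List (List String) × List String) line =>
      if PySem.Str.isIn keyword_lower (PySem.Str.lower line) then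
        if st.2 ≠ [] then (st.1 ++ [st.2], ([] : List String)) else st
      else (st.1, st.2 ++ [line]))
    ([], [])
  if st.2 ≠ [] then st.1 ++ [st.2] else st.1

-- ===== PORT B =====
-- inner while loop of Source B: advance j while j < n and not sep[j]
def pvRunEnd (sep : List Bool) (n j : Nat) : Nat :=
  if h : j < n ∧ sep.getD j true = false then pvRunEnd sep n (j+1) else j
termination_by n - j
decreasing_by omega

-- needed by pvScan's decreasing_by: the inner loop never moves backwards
theorem le_pvRunEnd (sep : List Bool) (n j : Nat) : j ≤ pvRunEnd sep n j := by
  induction j using (pvRunEnd.induct sep n) with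
  | case1 j h ih => rw [pvRunEnd, dif_pos h]; omega
  | case2 j h => rw [pvRunEnd, dif_neg h]

-- outer while loop of Source B over the index i
def pvScan (lines : List String) (sep : List Bool) (n i : Nat) : List (List String) :=
  if h : i < n then
    if sep.getD i true then pvScan lines sep n (i+1)
    else
      let j := pvRunEnd sep n (i+1)
      PySem.List.slice lines (some (i : Int)) (some (j : Int)) :: pvScan lines sep n j
  else []
termination_by n - i
decreasing_by
  · omega
  · have := le_pvRunEnd sep n (i+1); omega

-- port of Source B: separator mask, then the two-pointer scan
def split_lines_into_blocks_alt (lines : List String) (keyword : String) : List (List String) :=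
  let kl := PySem.Str.lower keyword
  let sep := lines.map (fun line => PySem.Str.isIn kl (PySem.Str.lower line))
  pvScan lines sep lines.length 0

-- ===== PRECONDITION & SPEC =====
def Spec_split_lines_into_blocks (lines : List String) (keyword : String) (out : List (List String)) : Prop := out = split_lines_into_blocks_alt lines keyword
instance (lines : List String) (keyword : String) (out : List (List String)) : Decidable (Spec_split_lines_into_blocks lines keyword out) := by unfold Spec_split_lines_into_blocks; infer_instance

-- ===== CLAIM (what is proved, stated in full; the proofs are below) =====
def Claim_equal_split_lines_into_blocks : Prop := ∀ (lines : List String) (keyword : String), Dom_split_lines_into_blocks lines keyword → Spec_split_lines_into_blocks lines keyword (split_lines_into_blocks lines keyword)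

-- ===== LEMMAS AND PROOFS =====

-- the split, stated structurally on the list of lines: skip separator lines,
-- otherwise emit the maximal non-separator run as a block
def pvG (q : String → Bool) : List String → List (List String)
  | [] => []
  | l :: ls =>
    if q l then pvG q ls
    else (l :: ls.takeWhile (fun x => !q x)) :: pvG q (ls.dropWhile (fun x => !q x))
termination_by ls => ls.length
decreasing_by
  · simp
  · have := List.length_dropWhile_le (fun x => !q x) ls; simp; omega

-- A's loop with an explicit current accumulator, including the final flush
def pvH (q : String → Bool) (cur : List String) : List String → List (List String)
  | [] => if cur ≠ [] then [cur] else []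
  | l :: ls =>
    if q l then (if cur ≠ [] then cur :: pvH q [] ls else pvH q [] ls)
    else pvH q (cur ++ [l]) ls

theorem foldA_eq_pvH (q : String → Bool) (ls : List String)
    (bs : List (List String)) (cur : List String) :
    (let st := ls.foldl
        (fun (st : List (List String) × List String) line =>
          if q line then
            if st.2 ≠ [] then (st.1 ++ [st.2], ([] : List String)) else st
          else (st.1, st.2 ++ [line])) (bs, cur)
      if st.2 ≠ [] then st.1 ++ [st.2] else st.1) = bs ++ pvH q cur ls := by
  induction ls generalizing bs cur with
  | nil => simp only [List.foldl_nil, pvH]; split_ifs <;> simp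
  | cons l ls ih =>
    simp only [List.foldl_cons]
    by_cases hq : q l <;> by_cases hc : cur = []
    · subst hc; simpa [pvH, hq] using ih bs []
    · simpa [pvH, hq, hc] using ih (bs ++ [cur]) []
    · subst hc; simpa [pvH, hq] using ih bs [l]
    · simpa [pvH, hq, hc] using ih bs (cur ++ [l])

theorem pvH_eq_pvG (q : String → Bool) (ls : List String) :
    pvH q [] ls = pvG q ls ∧
    ∀ cur : List String, cur ≠ [] →
      pvH q cur ls = (cur ++ ls.takeWhile (fun x => !q x)) :: pvG q (ls.dropWhile (fun x => !q x)) := by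
  induction ls with
  | nil => simp [pvH, pvG]
  | cons l ls ih =>
    constructor
    · by_cases hq : q l
      · simp [pvH, pvG, hq, ih.1]
      · rw [pvH, if_neg hq, List.nil_append, ih.2 [l] (by simp)]
        simp [pvG, hq]
    · intro cur hc
      by_cases hq : q l
      · simp [pvH, pvG, hq, hc, ih.1]
      · rw [pvH, if_neg hq, ih.2 (cur ++ [l]) (by simp)]
        simp [hq]

theorem pvG_cons (q : String → Bool) (l : String) (ls : List String) :
    pvG q (l :: ls) = if q l then pvG q ls
      else (l :: ls.takeWhile (fun x => !q x)) :: pvG q (ls.dropWhile (fun x => !q x)) := by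
  rw [pvG]

-- takeWhile/dropWhile as take/drop at the run length (no named Mathlib lemma found)
theorem pv_take_takeWhile (p : String → Bool) (l : List String) :
    l.take (l.takeWhile p).length = l.takeWhile p := by
  induction l with
  | nil => simp
  | cons x xs ih => by_cases h : p x <;> simp [h, ih]

theorem pv_drop_takeWhile (p : String → Bool) (l : List String) :
    l.drop (l.takeWhile p).length = l.dropWhile p := by
  induction l with
  | nil => simp
  | cons x xs ih => by_cases h : p x <;> simp [h, ih]

theorem pvRunEnd_eq (q : String → Bool) (lines : List String) (j : Nat) (hj : j ≤ lines.length) :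
    pvRunEnd (lines.map q) lines.length j
      = j + ((lines.drop j).takeWhile (fun x => !q x)).length := by
  by_cases h : j < lines.length
  · rw [List.drop_eq_getElem_cons h, List.takeWhile_cons]
    by_cases hq : q lines[j]
    · rw [pvRunEnd, dif_neg (by simp [List.getD_eq_getElem?_getD, h, hq]),
          if_neg (by simp [hq])]
      simp
    · rw [pvRunEnd, dif_pos ⟨h, by simp [List.getD_eq_getElem?_getD, h, hq]⟩,
          pvRunEnd_eq q lines (j+1) (by omega), if_pos (by simp [hq])]
      simp only [List.length_cons]
      omega
  · have : j = lines.length := by omega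
    subst this
    rw [pvRunEnd, dif_neg (by simp)]
    simp
termination_by lines.length - j
decreasing_by omega

theorem pvScan_eq_pvG (q : String → Bool) (lines : List String) (i : Nat) (hi : i ≤ lines.length) :
    pvScan lines (lines.map q) lines.length i = pvG q (lines.drop i) := by
  by_cases h : i < lines.length
  · by_cases hq : q lines[i]
    · rw [pvScan, dif_pos h, if_pos (by simp [List.getD_eq_getElem?_getD, h, hq]),
          pvScan_eq_pvG q lines (i+1) (by omega),
          List.drop_eq_getElem_cons h, pvG_cons, if_pos hq]
    · have hlen : ((lines.drop (i+1)).takeWhile (fun x => !q x)).length ≤ lines.length - (i+1) := by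
        have := (List.takeWhile_prefix (l := lines.drop (i+1)) (fun x => !q x)).length_le
        simpa using this
      rw [pvScan, dif_pos h, if_neg (by simp [List.getD_eq_getElem?_getD, h, hq])]
      show PySem.List.slice lines (some (i : Int))
            (some ((pvRunEnd (lines.map q) lines.length (i+1) : Nat) : Int))
          :: pvScan lines (lines.map q) lines.length (pvRunEnd (lines.map q) lines.length (i+1)) = _
      rw [pvRunEnd_eq q lines (i+1) (by omega),
          pvScan_eq_pvG q lines (i + 1 + ((lines.drop (i+1)).takeWhile (fun x => !q x)).length) (by omega),
          PySem.List.slice_natCast]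
      have h1 : i + 1 + ((lines.drop (i+1)).takeWhile (fun x => !q x)).length - i
          = ((lines.drop (i+1)).takeWhile (fun x => !q x)).length + 1 := by omega
      have h2 : lines.drop (i + 1 + ((lines.drop (i+1)).takeWhile (fun x => !q x)).length)
          = (lines.drop (i+1)).drop ((lines.drop (i+1)).takeWhile (fun x => !q x)).length := by
        rw [List.drop_drop]
      rw [h1, h2, pv_drop_takeWhile]
      conv_lhs => rw [List.drop_eq_getElem_cons h, List.take_succ_cons, pv_take_takeWhile]
      rw [List.drop_eq_getElem_cons h, pvG_cons, if_neg hq]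
  · have : i = lines.length := by omega
    subst this
    rw [pvScan, dif_neg (by omega)]
    simp [pvG]
termination_by lines.length - i
decreasing_by all_goals omega

-- ===== VERDICT (by name: the statement is the Claim_ definition above) =====
theorem split_lines_into_blocks_spec : Claim_equal_split_lines_into_blocks := by
  intro lines keyword _
  unfold Spec_split_lines_into_blocks
  have hA : split_lines_into_blocks lines keyword
      = pvH (fun line => PySem.Str.isIn (PySem.Str.lower keyword) (PySem.Str.lower line)) [] lines := by
    simpa [split_lines_into_blocks]
      using foldA_eq_pvH (fun line => PySem.Str.isIn (PySem.Str.lower keyword) (PySem.Str.lower line)) lines [] []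
  have hB : split_lines_into_blocks_alt lines keyword
      = pvG (fun line => PySem.Str.isIn (PySem.Str.lower keyword) (PySem.Str.lower line)) lines := by
    simpa [split_lines_into_blocks_alt]
      using pvScan_eq_pvG (fun line => PySem.Str.isIn (PySem.Str.lower keyword) (PySem.Str.lower line)) lines 0 (by omega)
  rw [hA, hB, (pvH_eq_pvG _ lines).1]
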